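-- pv_equiv track=rewrite | github.com/vaibhavagarwal14/GFG_Coding_Solutions | Easy/Minimum Operations/minimum-operations.py | minOperation
-- ===== SOURCE A (Python) =====
-- def minOperation(n):
--     # code here
--     s=0
--     while n!=0:
--         if n%2==0:
--             n//=2
--         else:
--             n-=1
--         s+=1
--     return s
-- ===== SOURCE B (Python) =====
-- def minOperation(n):
--     if n == 0:
--         return 0
--     return (n.bit_length() - 1) + bin(n).count('1')
-- ===== Notes on version B (the rewrite author's own statement) =====
-- stated objective: simpler
-- what changed: Replaces the halve/decrement simulation loop by a closed-form formula: (bit_length - 1) halvings plus popcount decrements.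
import Mathlib
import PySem

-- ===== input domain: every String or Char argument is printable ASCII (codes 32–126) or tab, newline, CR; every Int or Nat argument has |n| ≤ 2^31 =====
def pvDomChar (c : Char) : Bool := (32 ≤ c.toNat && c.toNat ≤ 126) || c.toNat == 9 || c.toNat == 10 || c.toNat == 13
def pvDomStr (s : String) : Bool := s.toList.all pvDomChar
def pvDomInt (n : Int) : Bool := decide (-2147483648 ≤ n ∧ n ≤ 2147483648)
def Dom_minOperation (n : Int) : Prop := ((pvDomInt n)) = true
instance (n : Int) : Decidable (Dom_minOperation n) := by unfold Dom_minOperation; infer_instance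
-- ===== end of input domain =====

-- B replaces A's halve/decrement simulation loop by the closed form (bit_length - 1) + popcount (simpler, no loop).


-- ===== PORT A =====
-- A's while loop; fuel = starting n.toNat bounds the iteration count (each step
-- strictly decreases a positive n, so the fuel is never exhausted on 0 ≤ n).
def minOpLoop (fuel : Nat) (n s : Int) : Int :=
  match fuel with
  | 0 => s
  | f + 1 =>
    if n = 0 then s
    else if PySem.Int.mod n 2 = 0 then minOpLoop f (PySem.Int.floordiv n 2) (s + 1)
    else minOpLoop f (n - 1) (s + 1)

def minOperation (n : Int) : Int := minOpLoop n.toNat n 0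

-- ===== PORT B =====
def minOperation_alt (n : Int) : Int :=
  if n = 0 then 0
  else ((PySem.Int.bitLength n : Int) - 1) + (PySem.Int.bitCount n : Int)

-- ===== PRECONDITION & SPEC =====
-- Pre_ excludes negative n, on which Python A loops forever (never returns).
def Pre_minOperation (n : Int) : Prop := 0 ≤ n
instance (n : Int) : Decidable (Pre_minOperation n) := by unfold Pre_minOperation; infer_instance
def pvWitness_minOperation : Int := 6

def Spec_minOperation (n : Int) (out : Int) : Prop := out = minOperation_alt n
instance (n : Int) (out : Int) : Decidable (Spec_minOperation n out) := by unfold Spec_minOperation; infer_instance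

-- ===== CLAIM (what is proved, stated in full; the proofs are below) =====
def Claim_equal_minOperation : Prop := ∀ (n : Int), Dom_minOperation n → Pre_minOperation n → Spec_minOperation n (minOperation n)

-- ===== LEMMAS AND PROOFS =====
-- the number of steps A's loop takes from a nonnegative n
def stepsFn (m : Nat) : Nat :=
  if h : m = 0 then 0
  else if m % 2 = 0 then 1 + stepsFn (m / 2)
  else 1 + stepsFn (m - 1)
decreasing_by all_goals omega

theorem minOpLoop_eq_steps (m : Nat) : ∀ (fuel : Nat) (s : Int), m ≤ fuel →
    minOpLoop fuel (m : Int) s = s + (stepsFn m : Int) := by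
  induction m using Nat.strong_induction_on with
  | _ m ih =>
    intro fuel s hf
    by_cases hm : m = 0
    · subst hm
      cases fuel with
      | zero => simp [minOpLoop, stepsFn]
      | succ f => simp [minOpLoop, stepsFn]
    · have h1 : 1 ≤ m := by omega
      cases fuel with
      | zero => omega
      | succ f =>
        rw [minOpLoop]
        have hne : (m : Int) ≠ 0 := by exact_mod_cast hm
        rw [if_neg hne]
        have hmod : PySem.Int.mod (m : Int) 2 = ((m % 2 : Nat) : Int) :=
          PySem.Int.mod_natCast m 2
        have hdiv : PySem.Int.floordiv (m : Int) 2 = ((m / 2 : Nat) : Int) :=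
          PySem.Int.floordiv_natCast m 2
        by_cases he : m % 2 = 0
        · have hs : stepsFn m = 1 + stepsFn (m / 2) := by
            rw [stepsFn, dif_neg hm, if_pos he]
          rw [if_pos (by rw [hmod, he]; simp), hdiv]
          rw [ih (m / 2) (by omega) f (s + 1) (by omega), hs]
          push_cast; ring
        · have hs : stepsFn m = 1 + stepsFn (m - 1) := by
            rw [stepsFn, dif_neg hm, if_neg he]
          rw [if_neg (by rw [hmod]; omega)]
          have : (m : Int) - 1 = ((m - 1 : Nat) : Int) := by omega
          rw [this, ih (m - 1) (by omega) f (s + 1) (by omega), hs]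
          push_cast; ring

-- the closed form for the step count
theorem stepsFn_closed (m : Nat) (hm : m ≠ 0) :
    (stepsFn m : Int) = ((PySem.Int.bitLength (m : Int) : Int) - 1) + (PySem.Int.bitCount (m : Int) : Int) := by
  induction m using Nat.strong_induction_on with
  | _ m ih =>
    have hbl := PySem.Int.bitLength_natCast (show 0 < m by omega)
    have hbc := PySem.Int.bitCount_natCast (show 0 < m by omega)
    by_cases h1 : m = 1
    · subst h1
      rw [stepsFn]; norm_num
      rw [stepsFn]; decide
    · have hh : m / 2 ≠ 0 := by omega
      have hih := ih (m / 2) (by omega) hh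
      have hbl1 : 1 ≤ PySem.Int.bitLength ((m / 2 : Nat) : Int) := by
        rw [PySem.Int.bitLength_natCast (show 0 < m / 2 by omega)]; omega
      by_cases he : m % 2 = 0
      · -- even: one halving step
        rw [stepsFn, dif_neg hm, if_pos he, hbl, hbc, he]
        generalize hk : m / 2 = k at hih hbl1 ⊢
        push_cast
        rw [hih]
        omega
      · -- odd, m ≥ 3: decrement then halving = two steps to m / 2
        rw [stepsFn, dif_neg hm, if_neg he]
        have hm1 : m - 1 ≠ 0 := by omega
        have he1 : (m - 1) % 2 = 0 := by omega
        rw [stepsFn, dif_neg hm1, if_pos he1]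
        have hq : (m - 1) / 2 = m / 2 := by omega
        have h2 : m % 2 = 1 := by omega
        rw [hq, hbl, hbc, h2]
        generalize hk : m / 2 = k at hih hbl1 ⊢
        push_cast
        rw [hih]
        omega

-- ===== VERDICT (by name: the statement is the Claim_ definition above) =====
theorem minOperation_spec : Claim_equal_minOperation := by
  intro n _ hpre
  unfold Pre_minOperation at hpre
  unfold Spec_minOperation minOperation minOperation_alt
  obtain ⟨m, rfl⟩ : ∃ m : Nat, n = (m : Int) := ⟨n.toNat, by omega⟩
  rw [Int.toNat_natCast]
  rw [minOpLoop_eq_steps m m 0 le_rfl]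
  by_cases hm : m = 0
  · subst hm; simp [stepsFn]
  · rw [if_neg (by exact_mod_cast hm), stepsFn_closed m hm]
    ring
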